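-- pv_equiv track=rewrite | github.com/yvesmarinho/enterprise-python-backup | src/python_backup/db/files.py | _extract_base_path
-- ===== SOURCE A (Python) =====
-- def _extract_base_path(pattern: str) -> str:
--     """
--     Extract base directory path from glob pattern.
--
--     Args:
--         pattern: Glob pattern (e.g., "/data/**/*.pdf")
--
--     Returns:
--         Base directory path without wildcards
--     """
--     # Remove glob wildcards to get base path
--     parts = pattern.split('/')
--     base_parts = []
--     for part in parts:
--         if '*' in part or '{' in part or '?' in part:
--             break
--         base_parts.append(part)
--
--     return '/'.join(base_parts) if base_parts else '/'
-- ===== SOURCE B (Python) =====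
-- def _extract_base_path(pattern: str) -> str:
--     # Single left-to-right character scan: remember the index of the most
--     # recently seen path separator; at the first wildcard character return
--     # everything before that separator (root if none was seen); with no
--     # wildcard, return the pattern unchanged.
--     last_slash = -1
--     for k, c in enumerate(pattern):
--         if c == '*' or c == '{' or c == '?':
--             return pattern[:last_slash] if last_slash >= 0 else '/'
--         if c == '/':
--             last_slash = k
--     return pattern
-- ===== Notes on version B (the rewrite author's own statement) =====
-- stated objective: simpler
-- what changed: Replaced split-into-parts + collect-loop + join with a single left-to-right character scan that tracks the index of the most recent path separator and returns a slice at the first wildcard character.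
import Mathlib
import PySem

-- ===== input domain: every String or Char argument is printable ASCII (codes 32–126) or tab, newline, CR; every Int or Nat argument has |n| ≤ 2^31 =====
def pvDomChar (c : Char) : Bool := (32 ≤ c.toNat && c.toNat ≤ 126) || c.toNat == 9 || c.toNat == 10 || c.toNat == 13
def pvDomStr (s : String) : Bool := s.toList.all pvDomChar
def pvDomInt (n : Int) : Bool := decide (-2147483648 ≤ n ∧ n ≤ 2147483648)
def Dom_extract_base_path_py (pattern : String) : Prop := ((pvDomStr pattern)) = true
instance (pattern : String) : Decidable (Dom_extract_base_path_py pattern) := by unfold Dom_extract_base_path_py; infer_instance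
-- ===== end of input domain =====

-- B replaces A's split/collect/join over separator-delimited parts by a single character
-- scan that tracks the last separator index and slices at the first wildcard (objective: simpler).


-- ===== PORT A =====
-- '*' in part or '{' in part or '?' in part
def pyHasWild (p : List Char) : Bool :=
  PySem.Chars.isIn ['*'] p || PySem.Chars.isIn ['{'] p || PySem.Chars.isIn ['?'] p

-- the for-loop: append each part until the first part containing a wildcard (break)
def pyCollect : List (List Char) → List (List Char)
  | [] => []
  | p :: ps => if pyHasWild p then [] else p :: pyCollect ps

def extract_base_path_py (pattern : String) : String :=
  let parts := PySem.Chars.splitOn pattern.toList ['/']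
  let baseParts := pyCollect parts
  if baseParts = [] then "/" else String.ofList (PySem.Chars.join ['/'] baseParts)

-- ===== PORT B =====
-- the for-loop over enumerate(pattern): last_slash is the index of the last '/' seen
def bLoop (pattern : String) : Int → List (Int × Char) → String
  | _, [] => pattern
  | last_slash, (k, c) :: rest =>
    if c = '*' ∨ c = '{' ∨ c = '?' then
      if last_slash ≥ 0 then
        String.ofList (PySem.List.slice pattern.toList none (some last_slash))
      else "/"
    else if c = '/' then bLoop pattern k rest
    else bLoop pattern last_slash rest

def extract_base_path_py_alt (pattern : String) : String :=
  bLoop pattern (-1) (PySem.List.enumerate pattern.toList)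

-- ===== PRECONDITION & SPEC =====
def Spec_extract_base_path_py (pattern : String) (out : String) : Prop := out = extract_base_path_py_alt pattern
instance (pattern : String) (out : String) : Decidable (Spec_extract_base_path_py pattern out) := by unfold Spec_extract_base_path_py; infer_instance

-- ===== CLAIM (what is proved, stated in full; the proofs are below) =====
def Claim_equal_extract_base_path_py : Prop := ∀ (pattern : String), Dom_extract_base_path_py pattern → Spec_extract_base_path_py pattern (extract_base_path_py pattern)

-- ===== LEMMAS AND PROOFS =====

-- clean structural version of splitting on a single character
def segsAux (c : Char) : List Char → List (List Char)
  | [] => [[]]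
  | a :: r => if a = c then [] :: segsAux c r else (segsAux c r).modifyHead (a :: ·)

-- index of the first wildcard character, if any
def firstWildIdx : List Char → Option Nat
  | [] => none
  | a :: r => if a = '*' ∨ a = '{' ∨ a = '?' then some 0 else (firstWildIdx r).map (· + 1)

-- index of the last '/', if any
def lastSlashIdx : List Char → Option Nat
  | [] => none
  | a :: r =>
    match lastSlashIdx r with
    | some t => some (t + 1)
    | none => if a = '/' then some 0 else none

-- common reference value: (collected-parts-empty?, joined base chars)
def bPair (s : List Char) : Bool × List Char :=
  match firstWildIdx s with
  | none => (false, s)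
  | some i =>
    match lastSlashIdx (s.take i) with
    | some L => (false, s.take L)
    | none => (true, [])

theorem isIn_single (c : Char) (q : List Char) : PySem.Chars.isIn [c] q = q.contains c := by
  by_cases h : c ∈ q
  · have h1 : [c] <:+: q := by
      obtain ⟨s, t, rfl⟩ := List.append_of_mem h
      exact ⟨s, t, by simp⟩
    simp [(PySem.Chars.isIn_iff_infix _ _).2 h1, h]
  · have h1 : ¬ [c] <:+: q := fun hi => h (hi.subset (by simp))
    simp [(PySem.Chars.isIn_eq_false_iff _ _).2 h1, h]

theorem pyHasWild_cons (a : Char) (p : List Char) :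
    pyHasWild (a :: p) = (decide (a = '*' ∨ a = '{' ∨ a = '?') || pyHasWild p) := by
  simp only [pyHasWild, isIn_single, List.contains_cons]
  cases ha : decide (a = '*' ∨ a = '{' ∨ a = '?') with
  | true =>
    rcases of_decide_eq_true ha with h | h | h <;> subst h <;> simp
  | false =>
    have h := of_decide_eq_false ha
    have h1 : a ≠ '*' := fun he => h (Or.inl he)
    have h2 : a ≠ '{' := fun he => h (Or.inr (Or.inl he))
    have h3 : a ≠ '?' := fun he => h (Or.inr (Or.inr he))
    have e1 : ('*' == a) = false := by simp [Ne.symm h1]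
    have e2 : ('{' == a) = false := by simp [Ne.symm h2]
    have e3 : ('?' == a) = false := by simp [Ne.symm h3]
    simp [e1, e2, e3]

theorem segsAux_ne_nil (c : Char) (l : List Char) : segsAux c l ≠ [] := by
  induction l with
  | nil => simp [segsAux]
  | cons a r ih =>
    simp only [segsAux]
    split
    · simp
    · cases h : segsAux c r with
      | nil => exact absurd h ih
      | cons p tl => simp

theorem splitOn_go_single (c : Char) : ∀ (fuel : Nat) (l cur : List Char) (acc : List (List Char)),
    l.length ≤ fuel →
    PySem.Chars.splitOn.go [c] fuel l cur acc
      = acc.reverse ++ (segsAux c l).modifyHead (cur.reverse ++ ·) := by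
  intro fuel
  induction fuel with
  | zero =>
    intro l cur acc h
    have : l = [] := List.length_eq_zero_iff.mp (Nat.le_zero.mp h)
    subst this
    simp [PySem.Chars.splitOn.go, segsAux]
  | succ n ih =>
    intro l cur acc h
    cases l with
    | nil => simp [PySem.Chars.splitOn.go, segsAux]
    | cons a rest =>
      rw [PySem.Chars.splitOn.go]
      have hpre : List.isPrefixOf [c] (a :: rest) = (c == a) := by
        simp [List.isPrefixOf]
      by_cases hac : a = c
      · subst hac
        simp only [hpre, beq_self_eq_true, if_true, List.length_cons, List.length_nil,
          Nat.zero_add, List.drop_succ_cons, List.drop_zero]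
        rw [ih rest [] (cur.reverse :: acc) (by simpa using Nat.le_of_succ_le_succ h)]
        simp only [segsAux, if_pos rfl]
        cases segsAux a rest <;> simp
      · have hca : (c == a) = false := by simp [Ne.symm hac]
        simp only [hpre, hca, Bool.false_eq_true, if_false]
        rw [ih rest (a :: cur) acc (by simpa using Nat.le_of_succ_le_succ h)]
        simp only [segsAux, hac, if_false]
        cases hs : segsAux c rest with
        | nil => exact absurd hs (segsAux_ne_nil c rest)
        | cons p tl => simp

theorem splitOn_single (c : Char) (s : List Char) :
    PySem.Chars.splitOn s [c] = segsAux c s := by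
  rw [PySem.Chars.splitOn, splitOn_go_single c (s.length + 1) s [] [] (by omega)]
  cases h : segsAux c s with
  | nil => exact absurd h (segsAux_ne_nil c s)
  | cons p tl => simp

theorem pyHasWild_nil : pyHasWild [] = false := by
  simp [pyHasWild, isIn_single]

theorem join_cons_head (sep : List Char) (a : Char) (p : List Char) (ct : List (List Char)) :
    PySem.Chars.join sep ((a :: p) :: ct) = a :: PySem.Chars.join sep (p :: ct) := by
  cases ct with
  | nil => simp [PySem.Chars.join_singleton]
  | cons q qt => simp [PySem.Chars.join_cons_cons]

theorem main_char : ∀ s : List Char,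
    (pyCollect (segsAux '/' s) = [] ↔ (bPair s).1 = true) ∧
    PySem.Chars.join ['/'] (pyCollect (segsAux '/' s)) = (bPair s).2 := by
  intro s
  induction s with
  | nil =>
    simp [segsAux, pyCollect, bPair, firstWildIdx, pyHasWild_nil, PySem.Chars.join_singleton]
  | cons a r ih =>
    by_cases hw : a = '*' ∨ a = '{' ∨ a = '?'
    · have hs : a ≠ '/' := by rcases hw with h | h | h <;> subst h <;> decide
      obtain ⟨p, tl, hseg⟩ := List.exists_cons_of_ne_nil (segsAux_ne_nil '/' r)
      have hwc : pyHasWild (a :: p) = true := by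
        rw [pyHasWild_cons]
        simp [hw]
      simp only [segsAux, hs, if_false, hseg, List.modifyHead, bPair, firstWildIdx,
        if_pos hw, pyCollect, hwc, if_true]
      simp [lastSlashIdx, PySem.Chars.join_nil]
    · by_cases hsl : a = '/'
      · subst hsl
        have hsegS : segsAux '/' ('/' :: r) = [] :: segsAux '/' r := by simp [segsAux]
        have hcolS : pyCollect ([] :: segsAux '/' r) = [] :: pyCollect (segsAux '/' r) := by
          simp [pyCollect, pyHasWild_nil]
        rw [hsegS, hcolS]
        cases hfw : firstWildIdx r with
        | none =>
          have hb : bPair r = (false, r) := by simp [bPair, hfw]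
          rw [hb] at ih
          obtain ⟨ih1, ih2⟩ := ih
          have hne : pyCollect (segsAux '/' r) ≠ [] := by
            intro h; exact absurd (ih1.mp h) (by simp)
          obtain ⟨q, qt, hq⟩ := List.exists_cons_of_ne_nil hne
          have hbS : bPair ('/' :: r) = (false, '/' :: r) := by
            simp [bPair, firstWildIdx, hfw]
          rw [hbS]
          constructor
          · simp
          · rw [hq]
            rw [hq] at ih2
            simpa [PySem.Chars.join_cons_cons] using ih2
        | some i =>
          cases hls : lastSlashIdx (r.take i) with
          | some t =>
            have hb : bPair r = (false, r.take t) := by simp [bPair, hfw, hls]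
            rw [hb] at ih
            obtain ⟨ih1, ih2⟩ := ih
            have hne : pyCollect (segsAux '/' r) ≠ [] := by
              intro h; exact absurd (ih1.mp h) (by simp)
            obtain ⟨q, qt, hq⟩ := List.exists_cons_of_ne_nil hne
            have hbS : bPair ('/' :: r) = (false, '/' :: r.take t) := by
              simp [bPair, firstWildIdx, hw, hfw, lastSlashIdx, hls]
            rw [hbS]
            constructor
            · simp
            · rw [hq]
              rw [hq] at ih2
              simpa [PySem.Chars.join_cons_cons] using ih2
          | none =>
            have hb : bPair r = (true, []) := by simp [bPair, hfw, hls]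
            rw [hb] at ih
            obtain ⟨ih1, _⟩ := ih
            have hnil : pyCollect (segsAux '/' r) = [] := ih1.mpr rfl
            have hbS : bPair ('/' :: r) = (false, []) := by
              simp [bPair, firstWildIdx, hfw, lastSlashIdx, hls]
            rw [hbS, hnil]
            simp [PySem.Chars.join_singleton]
      · obtain ⟨p, tl, hseg⟩ := List.exists_cons_of_ne_nil (segsAux_ne_nil '/' r)
        have hwc : pyHasWild (a :: p) = pyHasWild p := by
          rw [pyHasWild_cons]
          simp [hw]
        simp only [segsAux, hsl, if_false, hseg, List.modifyHead]
        rw [hseg] at ih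
        cases hpw : pyHasWild p with
        | true =>
          have hnilr : pyCollect (p :: tl) = [] := by simp [pyCollect, hpw]
          rw [hnilr] at ih
          obtain ⟨ih1, _⟩ := ih
          have hb1 : (bPair r).1 = true := ih1.mp rfl
          cases hfw : firstWildIdx r with
          | none => rw [show bPair r = (false, r) by simp [bPair, hfw]] at hb1; simp at hb1
          | some i =>
            cases hls : lastSlashIdx (r.take i) with
            | some t => rw [show bPair r = (false, r.take t) by simp [bPair, hfw, hls]] at hb1; simp at hb1
            | none =>
              have hbS : bPair (a :: r) = (true, []) := by
                simp [bPair, firstWildIdx, hw, hfw, lastSlashIdx, hls, hsl]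
              rw [hbS]
              simp [pyCollect, hwc, hpw, PySem.Chars.join_nil]
        | false =>
          have hcr : pyCollect (p :: tl) = p :: pyCollect tl := by simp [pyCollect, hpw]
          have hcs : pyCollect ((a :: p) :: tl) = (a :: p) :: pyCollect tl := by
            simp [pyCollect, hwc, hpw]
          rw [hcr] at ih
          obtain ⟨ih1, ih2⟩ := ih
          have hb1 : (bPair r).1 = false := by
            by_contra h
            exact absurd (ih1.mpr (by simpa using h)) (by simp)
          cases hfw : firstWildIdx r with
          | none =>
            have hb : bPair r = (false, r) := by simp [bPair, hfw]
            rw [hb] at ih2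
            have hbS : bPair (a :: r) = (false, a :: r) := by
              simp [bPair, firstWildIdx, hw, hfw]
            rw [hbS, hcs]
            exact ⟨by simp, by rw [join_cons_head, ih2]⟩
          | some i =>
            cases hls : lastSlashIdx (r.take i) with
            | some t =>
              have hb : bPair r = (false, r.take t) := by simp [bPair, hfw, hls]
              rw [hb] at ih2
              have hbS : bPair (a :: r) = (false, a :: r.take t) := by
                simp [bPair, firstWildIdx, hw, hfw, lastSlashIdx, hls, List.take_succ_cons]
              rw [hbS, hcs]
              exact ⟨by simp, by rw [join_cons_head, ih2]⟩
            | none =>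
              rw [show bPair r = (true, []) by simp [bPair, hfw, hls]] at hb1
              simp at hb1

theorem lastSlashIdx_snoc (p : List Char) (a : Char) :
    lastSlashIdx (p ++ [a]) = if a = '/' then some p.length else lastSlashIdx p := by
  induction p with
  | nil => simp [lastSlashIdx]
  | cons b q ih =>
    simp only [List.cons_append, lastSlashIdx, ih]
    by_cases ha : a = '/' <;>
      simp only [ha, if_pos, if_neg, if_true, if_false] <;>
      cases lastSlashIdx q <;> simp [lastSlashIdx]

theorem bLoop_spec (pattern : String) : ∀ (rest pre : List Char) (last : Int),
    pattern.toList = pre ++ rest →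
    last = (match lastSlashIdx pre with | some L => (L : Int) | none => -1) →
    bLoop pattern last (PySem.List.enumerate rest (pre.length : Int)) =
      match firstWildIdx rest with
      | none => pattern
      | some i =>
        match lastSlashIdx (pre ++ rest.take i) with
        | some L => String.ofList (pattern.toList.take L)
        | none => "/" := by
  intro rest
  induction rest with
  | nil =>
    intro pre last h1 h2
    simp [PySem.List.enumerate, bLoop, firstWildIdx]
  | cons c r' ih =>
    intro pre last h1 h2
    rw [PySem.List.enumerate_cons]
    by_cases hw : c = '*' ∨ c = '{' ∨ c = '?'
    · simp only [bLoop, if_pos hw]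
      have hfw : firstWildIdx (c :: r') = some 0 := by simp [firstWildIdx, hw]
      rw [hfw]
      simp only [List.take_zero, List.append_nil]
      cases hls : lastSlashIdx pre with
      | some L =>
        rw [hls] at h2
        have hge : last ≥ 0 := by rw [h2]; exact Int.natCast_nonneg L
        rw [if_pos hge, h2, PySem.List.slice_to_natCast]
      | none =>
        rw [hls] at h2
        have hlast : last = -1 := h2
        rw [if_neg (by omega)]
    · have hwb : ¬(c = '*' ∨ c = '{' ∨ c = '?') := hw
      by_cases hsl : c = '/'
      · subst hsl
        simp only [bLoop, if_neg hwb, if_pos rfl]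
        have h1' : pattern.toList = (pre ++ ['/']) ++ r' := by simpa [List.append_assoc] using h1
        have h2' : ((pre.length : Int)) =
            (match lastSlashIdx (pre ++ ['/']) with | some L => (L : Int) | none => -1) := by
          rw [lastSlashIdx_snoc]; simp
        have hst : (((pre ++ ['/']).length : Nat) : Int) = (pre.length : Int) + 1 := by
          simp
        have := ih (pre ++ ['/']) (pre.length : Int) h1' h2'
        rw [hst] at this
        rw [this]
        cases hfw : firstWildIdx r' with
        | none => simp [firstWildIdx, hw, hfw]
        | some i =>
          have : firstWildIdx ('/' :: r') = some (i + 1) := by simp [firstWildIdx, hw, hfw]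
          rw [this]
          simp [List.take_succ_cons, List.append_assoc]
      · simp only [bLoop, if_neg hwb, if_neg hsl]
        have h1' : pattern.toList = (pre ++ [c]) ++ r' := by simpa [List.append_assoc] using h1
        have h2' : last =
            (match lastSlashIdx (pre ++ [c]) with | some L => (L : Int) | none => -1) := by
          rw [lastSlashIdx_snoc, if_neg hsl]; exact h2
        have hst : (((pre ++ [c]).length : Nat) : Int) = (pre.length : Int) + 1 := by
          simp
        have := ih (pre ++ [c]) last h1' h2'
        rw [hst] at this
        rw [this]
        cases hfw : firstWildIdx r' with
        | none => simp [firstWildIdx, hw, hfw]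
        | some i =>
          have : firstWildIdx (c :: r') = some (i + 1) := by simp [firstWildIdx, hw, hfw]
          rw [this]
          simp [List.take_succ_cons, List.append_assoc]

-- ===== VERDICT (by name: the statement is the Claim_ definition above) =====
theorem extract_base_path_py_spec : Claim_equal_extract_base_path_py := by
  unfold Claim_equal_extract_base_path_py
  intro pattern _
  unfold Spec_extract_base_path_py extract_base_path_py extract_base_path_py_alt
  have hB := bLoop_spec pattern pattern.toList [] (-1) (by simp) (by simp [lastSlashIdx])
  simp only [List.length_nil, Nat.cast_zero, List.nil_append] at hB
  rw [hB]
  obtain ⟨m1, m2⟩ := main_char pattern.toList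
  rw [splitOn_single]
  cases hfw : firstWildIdx pattern.toList with
  | none =>
    have hb : bPair pattern.toList = (false, pattern.toList) := by simp [bPair, hfw]
    rw [hb] at m1 m2
    dsimp only
    rw [if_neg (fun h => by simpa using m1.mp h), m2]
    simp
  | some i =>
    cases hls : lastSlashIdx (pattern.toList.take i) with
    | some L =>
      have hb : bPair pattern.toList = (false, pattern.toList.take L) := by
        simp [bPair, hfw, hls]
      rw [hb] at m1 m2
      dsimp only
      rw [hls, if_neg (fun h => by simpa using m1.mp h), m2]
    | none =>
      have hb : bPair pattern.toList = (true, []) := by simp [bPair, hfw, hls]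
      rw [hb] at m1
      dsimp only
      rw [hls, if_pos (m1.mpr rfl)]
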